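-- pv_equiv track=rewrite | github.com/tofolo17/MAC0110-files | MAC Multimídia/Funções II/06.py | F
-- ===== SOURCE A (Python) =====
-- def F(i):
--     F1 = 2
--     Fa = 1
--     n = 3
--     while n <= i:
--         Fp = 2 * Fa + G(n - 2)
--         Fa = Fp
--         n += 1
--
--     return Fa if i > 1 else F1
--
-- def G(i):
--     G1 = 1
--     Ga = 2
--     n = 3
--     while n <= i:
--         Gp = Ga + 3 * F(n - 2)
--         Ga = Gp
--         n += 1
--
--     return Ga if i > 1 else G1
-- ===== SOURCE B (Python) =====
-- def F(i):
--     if i <= 1: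
--         return 2
--     # bottom-up DP: (F(n-2), F(n-1), G(n-2), G(n-1)) rolled forward
--     f2, f1, g2, g1 = 2, 1, 1, 2
--     for n in range(3, i + 1):
--         f2, f1, g2, g1 = f1, 2 * f1 + g2, g1, g1 + 3 * f2
--     return f1
-- ===== Notes on version B (the rewrite author's own statement) =====
-- stated objective: faster
-- what changed: replaced the mutually recursive F/G (each loop iteration re-computing the other sequence from scratch, exponential) with a single bottom-up pass rolling the last two values of both sequences forward; intended as faster: a timing run saw A time out on inputs where B returned, but could not confirm the label
import Mathlib
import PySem

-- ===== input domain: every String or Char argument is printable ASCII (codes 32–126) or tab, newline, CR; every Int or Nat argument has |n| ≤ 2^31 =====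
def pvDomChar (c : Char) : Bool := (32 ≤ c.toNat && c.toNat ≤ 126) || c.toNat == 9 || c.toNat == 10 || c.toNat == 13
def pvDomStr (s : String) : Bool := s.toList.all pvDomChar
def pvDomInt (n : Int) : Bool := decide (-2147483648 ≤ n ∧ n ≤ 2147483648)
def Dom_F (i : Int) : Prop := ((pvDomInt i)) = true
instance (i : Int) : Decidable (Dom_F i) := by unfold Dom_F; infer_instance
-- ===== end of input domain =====

-- B replaces the mutual recursion of F/G by one linear bottom-up pass carrying the
-- last two values of both sequences; intended as faster (a timing run saw A time
-- out on inputs where B returned, but could not confirm the label).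

-- ===== PORT A =====
-- A's while-loops become the proof-carrying tail recursions Floop/Gloop (n starts at 3).
mutual
def F (i : Int) : Int :=
  let Fa := Floop i 1 3 (by omega)
  if 1 < i then Fa else 2
  termination_by (i.toNat, i.toNat + 1)
  decreasing_by
    all_goals first
      | exact Prod.Lex.left _ _ (by omega)
      | exact Prod.Lex.right _ (by omega)
def Floop (i Fa n : Int) (h : 3 ≤ n) : Int :=
  if hn : n ≤ i then Floop i (2 * Fa + G (n - 2)) (n + 1) (by omega) else Fa
  termination_by (i.toNat, (i + 1 - n).toNat)
  decreasing_by
    all_goals first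
      | exact Prod.Lex.left _ _ (by omega)
      | exact Prod.Lex.right _ (by omega)
def G (i : Int) : Int :=
  let Ga := Gloop i 2 3 (by omega)
  if 1 < i then Ga else 1
  termination_by (i.toNat, i.toNat + 1)
  decreasing_by
    all_goals first
      | exact Prod.Lex.left _ _ (by omega)
      | exact Prod.Lex.right _ (by omega)
def Gloop (i Ga n : Int) (h : 3 ≤ n) : Int :=
  if hn : n ≤ i then Gloop i (Ga + 3 * F (n - 2)) (n + 1) (by omega) else Ga
  termination_by (i.toNat, (i + 1 - n).toNat)
  decreasing_by
    all_goals first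
      | exact Prod.Lex.left _ _ (by omega)
      | exact Prod.Lex.right _ (by omega)
end

-- ===== PORT B =====
-- one loop iteration of Source B: state (f2, f1, g2, g1); the loop variable n is unused
def Bstep (st : Int × Int × Int × Int) (_n : Int) : Int × Int × Int × Int :=
  (st.2.1, 2 * st.2.1 + st.2.2.1, st.2.2.2, st.2.2.2 + 3 * st.1)

def F_alt (i : Int) : Int :=
  if i ≤ 1 then 2
  else ((PySem.List.pyRange 3 (i + 1) 1).foldl Bstep (2, 1, 1, 2)).2.1

-- ===== PRECONDITION & SPEC =====
def Spec_F (i : Int) (out : Int) : Prop := out = F_alt i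
instance (i : Int) (out : Int) : Decidable (Spec_F i out) := by unfold Spec_F; infer_instance

-- ===== CLAIM (what is proved, stated in full; the proofs are below) =====
def Claim_equal_F : Prop := ∀ (i : Int), Dom_F i → Spec_F i (F i)

-- ===== LEMMAS AND PROOFS =====

-- the mathematical sequences: fv k = F(k), gv k = G(k) for k ≥ 0
mutual
def fv : Nat → Int
  | 0 => 2
  | 1 => 2
  | 2 => 1
  | n + 3 => 2 * fv (n + 2) + gv (n + 1)
def gv : Nat → Int
  | 0 => 1
  | 1 => 1
  | 2 => 2
  | n + 3 => gv (n + 2) + 3 * fv (n + 1)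
end

theorem Floop_eq (k : Nat) : ∀ (i n : Int) (h : 3 ≤ n),
    (i + 1 - n).toNat = k →
    (∀ m : Int, 1 ≤ m → m ≤ i - 2 → G m = gv m.toNat) →
    Floop i (fv (n - 1).toNat) n h = fv (max (n - 1) i).toNat := by
  induction k with
  | zero =>
    intro i n h hk _
    have hni : ¬ n ≤ i := by omega
    rw [Floop, dif_neg hni]
    have : max (n - 1) i = n - 1 := by omega
    rw [this]
  | succ k ih =>
    intro i n h hk HG
    have hni : n ≤ i := by omega
    rw [Floop, dif_pos hni]
    have hG : G (n - 2) = gv (n - 2).toNat := HG _ (by omega) (by omega)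
    have hfa : 2 * fv (n - 1).toNat + G (n - 2) = fv ((n + 1) - 1).toNat := by
      rw [hG]
      have h3 : ((n + 1) - 1).toNat = ((n + 1 - 1).toNat - 3) + 3 := by omega
      rw [h3, fv]
      have e1 : (n + 1 - 1).toNat - 3 + 2 = (n - 1).toNat := by omega
      have e2 : (n + 1 - 1).toNat - 3 + 1 = (n - 2).toNat := by omega
      rw [e1, e2]
    rw [hfa]
    have := ih i (n + 1) (by omega) (by omega) HG
    rw [this]
    have : max ((n + 1) - 1) i = max (n - 1) i := by omega
    rw [this]

theorem Gloop_eq (k : Nat) : ∀ (i n : Int) (h : 3 ≤ n),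
    (i + 1 - n).toNat = k →
    (∀ m : Int, 1 ≤ m → m ≤ i - 2 → F m = fv m.toNat) →
    Gloop i (gv (n - 1).toNat) n h = gv (max (n - 1) i).toNat := by
  induction k with
  | zero =>
    intro i n h hk _
    have hni : ¬ n ≤ i := by omega
    rw [Gloop, dif_neg hni]
    have : max (n - 1) i = n - 1 := by omega
    rw [this]
  | succ k ih =>
    intro i n h hk HF
    have hni : n ≤ i := by omega
    rw [Gloop, dif_pos hni]
    have hF : F (n - 2) = fv (n - 2).toNat := HF _ (by omega) (by omega)
    have hga : gv (n - 1).toNat + 3 * F (n - 2) = gv ((n + 1) - 1).toNat := by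
      rw [hF]
      have h3 : ((n + 1) - 1).toNat = ((n + 1 - 1).toNat - 3) + 3 := by omega
      rw [h3, gv]
      have e1 : (n + 1 - 1).toNat - 3 + 2 = (n - 1).toNat := by omega
      have e2 : (n + 1 - 1).toNat - 3 + 1 = (n - 2).toNat := by omega
      rw [e1, e2]
    rw [hga]
    have := ih i (n + 1) (by omega) (by omega) HF
    rw [this]
    have : max ((n + 1) - 1) i = max (n - 1) i := by omega
    rw [this]

theorem FG_eq_fv : ∀ (N : Nat) (i : Int), i.toNat ≤ N →
    F i = fv i.toNat ∧ G i = gv i.toNat := by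
  intro N
  induction N using Nat.strong_induction_on with
  | _ N IH =>
    intro i hi
    have HG : ∀ m : Int, 1 ≤ m → m ≤ i - 2 → G m = gv m.toNat := by
      intro m h1 h2
      by_cases hN : m.toNat < N
      · exact (IH m.toNat hN m le_rfl).2
      · omega
    have HF : ∀ m : Int, 1 ≤ m → m ≤ i - 2 → F m = fv m.toNat := by
      intro m h1 h2
      by_cases hN : m.toNat < N
      · exact (IH m.toNat hN m le_rfl).1
      · omega
    constructor
    · rw [F]
      by_cases h1 : 1 < i
      · rw [if_pos h1]
        have h2 : (1 : Int) = fv ((3 : Int) - 1).toNat := by decide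
        rw [h2, Floop_eq ((i + 1 - 3).toNat) i 3 (by omega) rfl HG]
        have : max ((3 : Int) - 1) i = max 2 i := by omega
        rw [this]
        congr 1
        omega
      · rw [if_neg h1]
        have : i.toNat = 0 ∨ i.toNat = 1 := by omega
        rcases this with h | h <;> rw [h] <;> rfl
    · rw [G]
      by_cases h1 : 1 < i
      · rw [if_pos h1]
        have h2 : (2 : Int) = gv ((3 : Int) - 1).toNat := by decide
        rw [h2, Gloop_eq ((i + 1 - 3).toNat) i 3 (by omega) rfl HF]
        have : max ((3 : Int) - 1) i = max 2 i := by omega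
        rw [this]
        congr 1
        omega
      · rw [if_neg h1]
        have : i.toNat = 0 ∨ i.toNat = 1 := by omega
        rcases this with h | h <;> rw [h] <;> rfl

theorem foldl_Bstep_eq (k : Nat) : ∀ (i n : Int), 3 ≤ n → (i + 1 - n).toNat = k →
    (PySem.List.pyRange n (i + 1) 1).foldl Bstep
      (fv (n - 2).toNat, fv (n - 1).toNat, gv (n - 2).toNat, gv (n - 1).toNat)
    = (fv (max (n - 2) (i - 1)).toNat, fv (max (n - 1) i).toNat,
       gv (max (n - 2) (i - 1)).toNat, gv (max (n - 1) i).toNat) := by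
  induction k with
  | zero =>
    intro i n h3 hk
    have hempty : PySem.List.pyRange n (i + 1) 1 = [] := by
      rw [PySem.List.pyRange_one]
      have : (i + 1 - n).toNat = 0 := hk
      rw [this]
      simp
    rw [hempty]
    have e1 : max (n - 2) (i - 1) = n - 2 := by omega
    have e2 : max (n - 1) i = n - 1 := by omega
    rw [e1, e2]
    rfl
  | succ k ih =>
    intro i n h3 hk
    have hlt : n < i + 1 := by omega
    rw [PySem.List.pyRange_one_cons hlt]
    rw [List.foldl_cons]
    have hstep : Bstep (fv (n - 2).toNat, fv (n - 1).toNat, gv (n - 2).toNat, gv (n - 1).toNat) n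
        = (fv ((n + 1) - 2).toNat, fv ((n + 1) - 1).toNat, gv ((n + 1) - 2).toNat, gv ((n + 1) - 1).toNat) := by
      unfold Bstep
      have ef : ((n + 1) - 1).toNat = (((n + 1) - 1).toNat - 3) + 3 := by omega
      have e1 : ((n + 1) - 1).toNat - 3 + 2 = (n - 1).toNat := by omega
      have e2 : ((n + 1) - 1).toNat - 3 + 1 = (n - 2).toNat := by omega
      have e3 : ((n + 1) - 2).toNat = (n - 1).toNat := by omega
      simp only [e3]
      rw [ef, fv, gv, e1, e2]
    rw [hstep]
    have := ih i (n + 1) (by omega) (by omega)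
    rw [this]
    have e1 : max ((n + 1) - 2) (i - 1) = max (n - 2) (i - 1) := by omega
    have e2 : max ((n + 1) - 1) i = max (n - 1) i := by omega
    rw [e1, e2]

theorem F_alt_eq_fv (i : Int) : F_alt i = fv i.toNat := by
  unfold F_alt
  by_cases h1 : i ≤ 1
  · rw [if_pos h1]
    have : i.toNat = 0 ∨ i.toNat = 1 := by omega
    rcases this with h | h <;> rw [h] <;> rfl
  · rw [if_neg h1]
    have hinit : ((2 : Int), (1 : Int), (1 : Int), (2 : Int))
        = (fv ((3 : Int) - 2).toNat, fv ((3 : Int) - 1).toNat, gv ((3 : Int) - 2).toNat, gv ((3 : Int) - 1).toNat) := by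
      decide
    rw [hinit, foldl_Bstep_eq ((i + 1 - 3).toNat) i 3 (by omega) rfl]
    have : max ((3 : Int) - 1) i = i := by omega
    rw [this]

-- ===== VERDICT (by name: the statement is the Claim_ definition above) =====
theorem F_spec : Claim_equal_F := by
  intro i _
  unfold Spec_F
  rw [F_alt_eq_fv, (FG_eq_fv i.toNat i le_rfl).1]
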